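-- pv_equiv track=rewrite | github.com/ggerveni/book_llm_twin | advanced_chunking.py | _handle_abbreviations
-- ===== SOURCE A (Python) =====
-- def _handle_abbreviations(text: str) -> str:
--     """Replace abbreviations with temporary placeholders"""
--     # This prevents splitting on abbreviations
--     abbreviations = {
--         'Mr.': 'MR_TEMP',
--         'Ms.': 'MS_TEMP',
--         'Mrs.': 'MRS_TEMP',
--         'Dr.': 'DR_TEMP',
--         'Prof.': 'PROF_TEMP',
--         'Inc.': 'INC_TEMP',
--         'Ltd.': 'LTD_TEMP',
--         'etc.': 'ETC_TEMP',
--     }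
--
--     result = text
--     for abbrev, placeholder in abbreviations.items():
--         result = result.replace(abbrev, placeholder)
--
--     return result
-- ===== SOURCE B (Python) =====
-- import re
--
-- _ABBREVIATIONS = {
--     'Mr.': 'MR_TEMP',
--     'Ms.': 'MS_TEMP',
--     'Mrs.': 'MRS_TEMP',
--     'Dr.': 'DR_TEMP',
--     'Prof.': 'PROF_TEMP',
--     'Inc.': 'INC_TEMP',
--     'Ltd.': 'LTD_TEMP',
--     'etc.': 'ETC_TEMP',
-- }
-- _ABBREV_RE = re.compile('|'.join(re.escape(a) for a in _ABBREVIATIONS))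
--
--
-- def _handle_abbreviations(text: str) -> str:
--     """Replace abbreviations with temporary placeholders in one scan."""
--     return _ABBREV_RE.sub(lambda m: _ABBREVIATIONS[m.group(0)], text)
-- ===== Notes on version B (the rewrite author's own statement) =====
-- stated objective: idiomatic
-- what changed: A makes eight sequential full-string str.replace passes (one per abbreviation); B compiles a single regex alternation of the escaped abbreviations and does one left-to-right re.sub pass with a dict-lookup callback.
-- intended difference: On texts containing 'Mr.rof.', 'Ms.rof.', 'Mrs.rof.' or 'Dr.rof.', A's sequential passes let the trailing 'P' of an already-inserted placeholder merge with the following literal 'rof.' into a phantom 'Prof.' which A also replaces (A('Mr.rof.') = 'MR_TEMPROF_TEMP'), while B replaces only abbreviations actually present in the text ('MR_TEMProf.'), which is the intended behaviour. — e.g. on _handle_abbreviations("Mr.rof."): A returns "MR_TEMPROF_TEMP", B returns "MR_TEMProf."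
import Mathlib
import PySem

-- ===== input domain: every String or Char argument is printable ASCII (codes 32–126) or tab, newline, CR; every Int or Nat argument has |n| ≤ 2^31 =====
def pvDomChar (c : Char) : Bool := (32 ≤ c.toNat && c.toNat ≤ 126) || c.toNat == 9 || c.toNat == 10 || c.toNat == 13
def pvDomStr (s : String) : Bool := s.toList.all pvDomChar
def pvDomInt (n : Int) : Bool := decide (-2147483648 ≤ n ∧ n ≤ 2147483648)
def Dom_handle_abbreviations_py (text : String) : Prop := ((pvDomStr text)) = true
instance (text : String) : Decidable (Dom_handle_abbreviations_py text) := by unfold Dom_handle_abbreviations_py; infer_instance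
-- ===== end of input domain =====

set_option maxRecDepth 2000

-- B replaces A's eight sequential full-string `.replace` passes by one single left-to-right scan
-- (in Python: one compiled regex alternation with a dict-lookup callback); same placeholders
-- (objective: idiomatic single pass).

-- ===== PORT A =====
-- literal transliteration of A: result = text, then eight successive str.replace passes in dict order
def handle_abbreviations_py (text : String) : String :=
  let result := text
  let result := PySem.Str.replace result "Mr." "MR_TEMP"
  let result := PySem.Str.replace result "Ms." "MS_TEMP"
  let result := PySem.Str.replace result "Mrs." "MRS_TEMP"
  let result := PySem.Str.replace result "Dr." "DR_TEMP"
  let result := PySem.Str.replace result "Prof." "PROF_TEMP"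
  let result := PySem.Str.replace result "Inc." "INC_TEMP"
  let result := PySem.Str.replace result "Ltd." "LTD_TEMP"
  let result := PySem.Str.replace result "etc." "ETC_TEMP"
  result

-- ===== PORT B =====
-- B-side helpers: the eight abbreviations and their placeholders, as char lists
def pMr : List Char := ['M','r','.']
def pMs : List Char := ['M','s','.']
def pMrs : List Char := ['M','r','s','.']
def pDr : List Char := ['D','r','.']
def pProf : List Char := ['P','r','o','f','.']
def pInc : List Char := ['I','n','c','.']
def pLtd : List Char := ['L','t','d','.']
def pEtc : List Char := ['e','t','c','.']
def rMr : List Char := ['M','R','_','T','E','M','P']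
def rMs : List Char := ['M','S','_','T','E','M','P']
def rMrs : List Char := ['M','R','S','_','T','E','M','P']
def rDr : List Char := ['D','R','_','T','E','M','P']
def rProf : List Char := ['P','R','O','F','_','T','E','M','P']
def rInc : List Char := ['I','N','C','_','T','E','M','P']
def rLtd : List Char := ['L','T','D','_','T','E','M','P']
def rEtc : List Char := ['E','T','C','_','T','E','M','P']

-- the single left-to-right scan performed by B's regex alternation (re.sub: leftmost match wins,
-- alternatives tried in dict order; no abbreviation is a prefix of another, so at most one matches)
def scan : List Char → List Char
  | [] => []
  | c :: t =>
    if pMr.isPrefixOf (c :: t) then rMr ++ scan (t.drop 2)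
    else if pMs.isPrefixOf (c :: t) then rMs ++ scan (t.drop 2)
    else if pMrs.isPrefixOf (c :: t) then rMrs ++ scan (t.drop 3)
    else if pDr.isPrefixOf (c :: t) then rDr ++ scan (t.drop 2)
    else if pProf.isPrefixOf (c :: t) then rProf ++ scan (t.drop 4)
    else if pInc.isPrefixOf (c :: t) then rInc ++ scan (t.drop 3)
    else if pLtd.isPrefixOf (c :: t) then rLtd ++ scan (t.drop 3)
    else if pEtc.isPrefixOf (c :: t) then rEtc ++ scan (t.drop 3)
    else c :: scan t
termination_by l => l.length
decreasing_by all_goals simp only [List.length_cons, List.length_drop]; omega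

def handle_abbreviations_py_alt (text : String) : String :=
  String.ofList (scan text.toList)

-- ===== PRECONDITION & SPEC =====
-- On texts containing "Mr.rof.", "Ms.rof.", "Mrs.rof." or "Dr.rof.", A's sequential passes let the
-- trailing 'P' of an already-inserted placeholder merge with the following literal "rof." into a
-- phantom "Prof." that A then also replaces (A "Mr.rof." = "MR_TEMPROF_TEMP"), while B replaces only
-- the abbreviations actually present in the text ("MR_TEMProf."), which is the intended behaviour.
def D_handle_abbreviations_py (text : String) : Prop :=
  PySem.Str.isIn "Mr.rof." text = true ∨ PySem.Str.isIn "Ms.rof." text = true ∨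
  PySem.Str.isIn "Mrs.rof." text = true ∨ PySem.Str.isIn "Dr.rof." text = true
instance (text : String) : Decidable (D_handle_abbreviations_py text) := by
  unfold D_handle_abbreviations_py; infer_instance

def Spec_handle_abbreviations_py (text : String) (out : String) : Prop :=
  ¬ D_handle_abbreviations_py text → out = handle_abbreviations_py_alt text
instance (text : String) (out : String) : Decidable (Spec_handle_abbreviations_py text out) := by
  unfold Spec_handle_abbreviations_py; infer_instance

def pvDiffWitness_handle_abbreviations_py : String := "Mr.rof."
def pvDiffWitnessOut_handle_abbreviations_py : String × String := ("MR_TEMPROF_TEMP", "MR_TEMProf.")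

-- ===== CLAIM (what is proved, stated in full; the proofs are below) =====
def Claim_unchanged_handle_abbreviations_py : Prop := ∀ (text : String), Dom_handle_abbreviations_py text → Spec_handle_abbreviations_py text (handle_abbreviations_py text)
def Claim_changed_handle_abbreviations_py : Prop := Dom_handle_abbreviations_py (pvDiffWitness_handle_abbreviations_py) ∧ D_handle_abbreviations_py (pvDiffWitness_handle_abbreviations_py) ∧ handle_abbreviations_py (pvDiffWitness_handle_abbreviations_py) = pvDiffWitnessOut_handle_abbreviations_py.1 ∧ handle_abbreviations_py_alt (pvDiffWitness_handle_abbreviations_py) = pvDiffWitnessOut_handle_abbreviations_py.2 ∧ pvDiffWitnessOut_handle_abbreviations_py.1 ≠ pvDiffWitnessOut_handle_abbreviations_py.2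
def Claim_exact_handle_abbreviations_py : Prop := ∀ (text : String), Dom_handle_abbreviations_py text → D_handle_abbreviations_py text → handle_abbreviations_py text ≠ handle_abbreviations_py_alt text

-- ===== LEMMAS AND PROOFS =====


def rep (p r : List Char) : List Char → List Char
  | [] => []
  | c :: t => if p.isPrefixOf (c :: t) then r ++ rep p r (t.drop (p.length - 1)) else c :: rep p r t
termination_by l => l.length
decreasing_by all_goals simp only [List.length_cons, List.length_drop]; omega

lemma go_eq (o n : List Char) (ho : o ≠ []) :
    ∀ fuel l acc, l.length ≤ fuel →
      PySem.Chars.replace.go o n fuel l acc = acc.reverse ++ rep o n l := by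
  intro fuel
  induction fuel with
  | zero =>
    intro l acc hl
    have : l = [] := by cases l <;> simp_all
    subst this
    simp [PySem.Chars.replace.go, rep]
  | succ m ih =>
    intro l acc hl
    cases l with
    | nil => simp [PySem.Chars.replace.go, rep]
    | cons c t =>
      rw [PySem.Chars.replace.go]
      simp only [List.length_cons] at hl
      by_cases h : o.isPrefixOf (c :: t)
      · simp only [h, if_true]
        rw [rep, if_pos h]
        have hlen : o.length ≥ 1 := by cases o <;> simp_all
        have hdrop : (c :: t).drop o.length = t.drop (o.length - 1) := by
          cases o with
          | nil => simp_all
          | cons a o' => simp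
        rw [hdrop] at *
        rw [ih (t.drop (o.length - 1)) (n.reverse ++ acc) (by simp only [List.length_drop]; omega)]
        simp
      · simp only [h, if_false]
        rw [rep, if_neg h]
        rw [ih t (c :: acc) (by omega)]
        simp

lemma replace_eq_rep (o n : List Char) (ho : o ≠ []) (l : List Char) :
    PySem.Chars.replace l o n = rep o n l := by
  rw [PySem.Chars.replace]
  rw [if_neg (by simpa using ho)]
  simpa using go_eq o n ho l.length l [] le_rfl

def mism (p a : List Char) : Bool :=
  (List.range p.length).any (fun m => decide (m < a.length) && (p[m]? != a[m]?))

lemma not_prefix_of_mism {p a : List Char} (h : mism p a = true) (x : List Char) :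
    ¬ p <+: (a ++ x) := by
  intro hpre
  simp only [mism, List.any_eq_true, List.mem_range, Bool.and_eq_true, decide_eq_true_eq,
    bne_iff_ne] at h
  obtain ⟨m, hmp, hma, hne⟩ := h
  obtain ⟨s, hs⟩ := hpre
  apply hne
  have h1 : (p ++ s)[m]? = p[m]? := List.getElem?_append_left hmp
  have h2 : (a ++ x)[m]? = a[m]? := List.getElem?_append_left hma
  rw [hs] at h1
  rw [← h1, h2]

lemma rep_cons_neg {p : List Char} (r : List Char) {c : Char} {t : List Char}
    (h : ¬ p <+: (c :: t)) : rep p r (c :: t) = c :: rep p r t := by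
  rw [rep, if_neg (by simpa [List.isPrefixOf_iff_prefix] using h)]

lemma rep_match (c : Char) (p' r x : List Char) :
    rep (c :: p') r ((c :: p') ++ x) = r ++ rep (c :: p') r x := by
  rw [List.cons_append, rep, if_pos (by simp [List.isPrefixOf_iff_prefix])]
  simp [List.drop_left']

lemma rep_skip (p r : List Char) (a x : List Char)
    (h : ∀ k < a.length, ¬ p <+: (a.drop k ++ x)) :
    rep p r (a ++ x) = a ++ rep p r x := by
  induction a with
  | nil => simp
  | cons c a' ih =>
    rw [List.cons_append, rep_cons_neg r (by simpa using h 0 (by simp))]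
    rw [ih (fun k hk => by simpa using h (k + 1) (by simpa using hk))]
    rfl

lemma rep_inert (p r : List Char) (hr : r ≠ []) :
    ∀ u s, (∀ c ∈ s, c ∉ r ∧ p.head? ≠ some c) → s <+: rep p r u → s <+: u := by
  intro u
  induction u with
  | nil => intro s hs hpre; simpa [rep] using hpre
  | cons c t ih =>
    intro s hs hpre
    rw [rep] at hpre
    by_cases hp : p.isPrefixOf (c :: t)
    · rw [if_pos hp] at hpre
      cases s with
      | nil => exact List.nil_prefix
      | cons c0 s' =>
        exfalso
        cases r with
        | nil => exact hr rfl
        | cons d r' =>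
          rw [List.cons_append, List.cons_prefix_cons] at hpre
          exact (hs c0 (by simp)).1 (by simp [hpre.1])
    · rw [if_neg hp] at hpre
      cases s with
      | nil => exact List.nil_prefix
      | cons c0 s' =>
        rw [List.cons_prefix_cons] at hpre
        obtain ⟨rfl, hs'⟩ := hpre
        have := ih s' (fun d hd => hs d (by simp [hd])) hs'
        exact List.cons_prefix_cons.mpr ⟨rfl, this⟩

def passes : List (List Char × List Char) → List Char → List Char
  | [], l => l
  | pr :: ps, l => passes ps (rep pr.1 pr.2 l)

def PATS : List (List Char × List Char) :=
  [(pMr,rMr),(pMs,rMs),(pMrs,rMrs),(pDr,rDr),(pProf,rProf),(pInc,rInc),(pLtd,rLtd),(pEtc,rEtc)]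

def rof : List Char := ['r','o','f','.']

lemma passes_nil (ps : List (List Char × List Char)) : passes ps [] = [] := by
  induction ps with
  | nil => rfl
  | cons pr ps ih => rw [passes, rep]; exact ih

lemma passes_append (ps₁ ps₂ : List (List Char × List Char)) (l : List Char) :
    passes (ps₁ ++ ps₂) l = passes ps₂ (passes ps₁ l) := by
  induction ps₁ generalizing l with
  | nil => rfl
  | cons pr ps ih => rw [List.cons_append, passes, passes]; exact ih _

lemma pats_r_ne_nil : ∀ pr ∈ PATS, pr.2 ≠ [] := by decide
lemma pats_p_ne_nil : ∀ pr ∈ PATS, pr.1 ≠ [] := by decide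
lemma inert_rofB : (PATS.all (fun pr => rof.all (fun c => !(pr.2.contains c) && !(pr.1.head? == some c)))) = true := by decide
lemma inert_rof : ∀ pr ∈ PATS, ∀ c ∈ rof, c ∉ pr.2 ∧ pr.1.head? ≠ some c := by
  have h := inert_rofB
  simp only [List.all_eq_true, Bool.and_eq_true, Bool.not_eq_true', beq_eq_false_iff_ne,
    List.contains_eq_mem] at h
  intro pr hpr c hc
  exact ⟨by simpa using (h pr hpr c hc).1, (h pr hpr c hc).2⟩
lemma inert_tailsB : (PATS.all (fun pr => PATS.all (fun pr' => pr.1.tail.all (fun c => !(pr'.2.contains c) && !(pr'.1.head? == some c))))) = true := by decide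
lemma inert_tails : ∀ pr ∈ PATS, ∀ pr' ∈ PATS, ∀ c ∈ pr.1.tail, c ∉ pr'.2 ∧ pr'.1.head? ≠ some c := by
  have h := inert_tailsB
  simp only [List.all_eq_true, Bool.and_eq_true, Bool.not_eq_true', beq_eq_false_iff_ne,
    List.contains_eq_mem] at h
  intro pr hpr pr' hpr' c hc
  exact ⟨by simpa using (h pr hpr pr' hpr' c hc).1, (h pr hpr pr' hpr' c hc).2⟩

lemma passes_inert (ps : List (List Char × List Char)) (hsub : ps ⊆ PATS) (s : List Char)
    (hs : ∀ pr ∈ PATS, ∀ c ∈ s, c ∉ pr.2 ∧ pr.1.head? ≠ some c) :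
    ∀ u, s <+: passes ps u → s <+: u := by
  induction ps with
  | nil => intro u h; exact h
  | cons pr ps ih =>
    intro u h
    rw [passes] at h
    have h1 := ih (fun x hx => hsub (by simp [hx])) (rep pr.1 pr.2 u) h
    exact rep_inert pr.1 pr.2 (pats_r_ne_nil pr (hsub (by simp))) u s
      (hs pr (hsub (by simp))) h1

lemma passes_skip (ps : List (List Char × List Char)) (a x : List Char)
    (h : ∀ pr ∈ ps, ∀ k < a.length, mism pr.1 (a.drop k) = true) :
    passes ps (a ++ x) = a ++ passes ps x := by
  induction ps generalizing x with
  | nil => rfl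
  | cons pr ps ih =>
    rw [passes, passes]
    rw [rep_skip pr.1 pr.2 a x
      (fun k hk => not_prefix_of_mism (h pr (by simp) k hk) x)]
    exact ih _ (fun pr' h' k hk => h pr' (by simp [h']) k hk)

def phOK (r : List Char) : Bool :=
  (List.range r.length).all (fun k => PATS.all (fun pr =>
    mism pr.1 (r.drop k) || (decide (r.drop k = ['P']) && decide (pr.1 = pProf))))

lemma passes_skip_ph (ps : List (List Char × List Char)) (hsub : ps ⊆ PATS)
    (r : List Char) (hr : phOK r = true) (x : List Char)
    (hx : (∃ pr ∈ ps, pr.1 = pProf) → ¬ rof <+: x) :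
    passes ps (r ++ x) = r ++ passes ps x := by
  induction ps generalizing x with
  | nil => rfl
  | cons pr ps ih =>
    rw [passes, passes]
    have hmem : pr ∈ PATS := hsub (by simp)
    have hstep : rep pr.1 pr.2 (r ++ x) = r ++ rep pr.1 pr.2 x := by
      apply rep_skip
      intro k hk
      have := hr
      simp only [phOK, List.all_eq_true, List.mem_range] at this
      rcases Bool.or_eq_true _ _ |>.mp (this k hk pr hmem) with hm | hp
      · exact not_prefix_of_mism hm x
      · simp only [Bool.and_eq_true, decide_eq_true_eq] at hp
        rw [hp.1]
        intro hpre
        rw [hp.2] at hpre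
        rw [show pProf = 'P' :: rof by decide] at hpre
        have hrofx : rof <+: x := by
          rw [show (['P'] ++ x) = 'P' :: x from rfl, List.cons_prefix_cons] at hpre
          exact hpre.2
        exact hx ⟨pr, by simp, hp.2⟩ hrofx
    rw [hstep]
    apply ih (fun y hy => hsub (by simp [hy]))
    intro hex hrof
    have hxp := hx (by obtain ⟨pr', h1, h2⟩ := hex; exact ⟨pr', by simp [h1], h2⟩)
    exact hxp (rep_inert pr.1 pr.2 (pats_r_ne_nil pr hmem) x rof (inert_rof pr hmem) hrof)

lemma passes_cons (ps : List (List Char × List Char)) (hsub : ps ⊆ PATS) (c : Char) (t : List Char)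
    (h : ∀ pr ∈ ps, ¬ pr.1 <+: (c :: t)) :
    passes ps (c :: t) = c :: passes ps t := by
  induction ps generalizing t with
  | nil => rfl
  | cons pr ps ih =>
    have hmem : pr ∈ PATS := hsub (by simp)
    rw [passes, passes, rep_cons_neg pr.2 (h pr (by simp))]
    apply ih (fun y hy => hsub (by simp [hy]))
    intro pr' hpr' hpre
    have hmem' : pr' ∈ PATS := hsub (by simp [hpr'])
    obtain ⟨c0, v, hv⟩ : ∃ c0 v, pr'.1 = c0 :: v := by
      cases hv : pr'.1 with
      | nil => exact absurd hv (pats_p_ne_nil pr' hmem')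
      | cons a b => exact ⟨a, b, rfl⟩
    rw [hv, List.cons_prefix_cons] at hpre
    obtain ⟨rfl, hvp⟩ := hpre
    have hvt : v <+: t :=
      rep_inert pr.1 pr.2 (pats_r_ne_nil pr hmem) t v
        (fun d hd => inert_tails pr' hmem' pr hmem d (by simp [hv, hd])) hvp
    exact h pr' (by simp [hpr']) (by rw [hv]; exact List.cons_prefix_cons.mpr ⟨rfl, hvt⟩)

lemma case_match (pre post : List (List Char × List Char)) (p r : List Char)
    (hsplit : PATS = pre ++ (p, r) :: post)
    (hpre : ∀ pr ∈ pre, ∀ k < p.length, mism pr.1 (p.drop k) = true)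
    (hp : p ≠ []) (hr : phOK r = true) (t : List Char)
    (hx : (∃ pr ∈ post, pr.1 = pProf) → ¬ rof <+: t) :
    passes PATS (p ++ t) = r ++ passes PATS t := by
  obtain ⟨c, p', rfl⟩ : ∃ c p', p = c :: p' := by
    cases p with
    | nil => exact absurd rfl hp
    | cons a b => exact ⟨a, b, rfl⟩
  have hpostsub : post ⊆ PATS := fun y hy => by rw [hsplit]; simp [hy]
  have hpresub : pre ++ [((c :: p'), r)] ⊆ PATS := fun y hy => by
    rw [hsplit]; simp at hy; rcases hy with hy | hy <;> simp [hy]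
  have hrep : rep (c :: p') r (passes pre t) = passes (pre ++ [((c :: p'), r)]) t := by
    rw [passes_append]; rfl
  calc passes PATS ((c :: p') ++ t)
      = passes (((c :: p'), r) :: post) (passes pre ((c :: p') ++ t)) := by
        rw [hsplit, passes_append]
    _ = passes (((c :: p'), r) :: post) ((c :: p') ++ passes pre t) := by
        rw [passes_skip pre _ _ hpre]
    _ = passes post (r ++ rep (c :: p') r (passes pre t)) := by
        rw [passes, rep_match]
    _ = r ++ passes post (rep (c :: p') r (passes pre t)) := by
        apply passes_skip_ph post hpostsub r hr
        intro hex hrof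
        exact hx hex (passes_inert _ hpresub rof inert_rof t (by rw [← hrep]; exact hrof))
    _ = r ++ passes PATS t := by rw [hsplit, passes_append, passes]

lemma scan_mr (t : List Char) : scan (pMr ++ t) = rMr ++ scan t := by
  simp [scan, pMr, pMs, pMrs, pDr, pProf, pInc, pLtd, pEtc, List.isPrefixOf]
lemma scan_ms (t : List Char) : scan (pMs ++ t) = rMs ++ scan t := by
  simp [scan, pMr, pMs, pMrs, pDr, pProf, pInc, pLtd, pEtc, List.isPrefixOf]
lemma scan_mrs (t : List Char) : scan (pMrs ++ t) = rMrs ++ scan t := by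
  simp [scan, pMr, pMs, pMrs, pDr, pProf, pInc, pLtd, pEtc, List.isPrefixOf]
lemma scan_dr (t : List Char) : scan (pDr ++ t) = rDr ++ scan t := by
  simp [scan, pMr, pMs, pMrs, pDr, pProf, pInc, pLtd, pEtc, List.isPrefixOf]
lemma scan_prof (t : List Char) : scan (pProf ++ t) = rProf ++ scan t := by
  simp [scan, pMr, pMs, pMrs, pDr, pProf, pInc, pLtd, pEtc, List.isPrefixOf]
lemma scan_inc (t : List Char) : scan (pInc ++ t) = rInc ++ scan t := by
  simp [scan, pMr, pMs, pMrs, pDr, pProf, pInc, pLtd, pEtc, List.isPrefixOf]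
lemma scan_ltd (t : List Char) : scan (pLtd ++ t) = rLtd ++ scan t := by
  simp [scan, pMr, pMs, pMrs, pDr, pProf, pInc, pLtd, pEtc, List.isPrefixOf]
lemma scan_etc (t : List Char) : scan (pEtc ++ t) = rEtc ++ scan t := by
  simp [scan, pMr, pMs, pMrs, pDr, pProf, pInc, pLtd, pEtc, List.isPrefixOf]

lemma scan_cons_neg (c : Char) (t : List Char) (h : ∀ pr ∈ PATS, ¬ pr.1 <+: (c :: t)) :
    scan (c :: t) = c :: scan t := by
  have h1 : ¬ pMr.isPrefixOf (c :: t) = true := by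
    simpa [List.isPrefixOf_iff_prefix] using h (pMr,rMr) (by decide)
  have h2 : ¬ pMs.isPrefixOf (c :: t) = true := by
    simpa [List.isPrefixOf_iff_prefix] using h (pMs,rMs) (by decide)
  have h3 : ¬ pMrs.isPrefixOf (c :: t) = true := by
    simpa [List.isPrefixOf_iff_prefix] using h (pMrs,rMrs) (by decide)
  have h4 : ¬ pDr.isPrefixOf (c :: t) = true := by
    simpa [List.isPrefixOf_iff_prefix] using h (pDr,rDr) (by decide)
  have h5 : ¬ pProf.isPrefixOf (c :: t) = true := by
    simpa [List.isPrefixOf_iff_prefix] using h (pProf,rProf) (by decide)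
  have h6 : ¬ pInc.isPrefixOf (c :: t) = true := by
    simpa [List.isPrefixOf_iff_prefix] using h (pInc,rInc) (by decide)
  have h7 : ¬ pLtd.isPrefixOf (c :: t) = true := by
    simpa [List.isPrefixOf_iff_prefix] using h (pLtd,rLtd) (by decide)
  have h8 : ¬ pEtc.isPrefixOf (c :: t) = true := by
    simpa [List.isPrefixOf_iff_prefix] using h (pEtc,rEtc) (by decide)
  rw [scan, if_neg h1, if_neg h2, if_neg h3, if_neg h4, if_neg h5, if_neg h6, if_neg h7, if_neg h8]

def NoBad (l : List Char) : Prop :=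
  ¬ ((pMr ++ rof) <:+: l ∨ (pMs ++ rof) <:+: l ∨ (pMrs ++ rof) <:+: l ∨ (pDr ++ rof) <:+: l)

lemma nobad_suffix {a t : List Char} (h : NoBad (a ++ t)) : NoBad t := by
  intro hb
  apply h
  have hsuf : t <:+: a ++ t := (List.suffix_append a t).isInfix
  rcases hb with h1 | h1 | h1 | h1
  · exact Or.inl (h1.trans hsuf)
  · exact Or.inr (Or.inl (h1.trans hsuf))
  · exact Or.inr (Or.inr (Or.inl (h1.trans hsuf)))
  · exact Or.inr (Or.inr (Or.inr (h1.trans hsuf)))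

lemma main (n : Nat) : ∀ l : List Char, l.length ≤ n → NoBad l → passes PATS l = scan l := by
  induction n with
  | zero =>
    intro l hl _
    have hnil : l = [] := by cases l <;> simp_all
    subst hnil
    rw [passes_nil, scan]
  | succ m ih =>
    intro l hl hB
    by_cases h1 : pMr <+: l
    · obtain ⟨t, rfl⟩ := h1
      have hlt : t.length ≤ m := by simp [pMr] at hl; omega
      rw [case_match [] [(pMs,rMs),(pMrs,rMrs),(pDr,rDr),(pProf,rProf),(pInc,rInc),(pLtd,rLtd),(pEtc,rEtc)] pMr rMr rfl (by decide) (by decide) (by decide) t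
        (fun _ hrof => by
          obtain ⟨s, hs⟩ := hrof
          have hinf : (pMr ++ rof) <:+: (pMr ++ t) :=
            List.IsPrefix.isInfix (⟨s, by rw [List.append_assoc, hs]⟩ : (pMr ++ rof) <+: (pMr ++ t))
          exact hB (Or.inl hinf))]
      rw [scan_mr, ih t hlt (nobad_suffix hB)]
    · by_cases h2 : pMs <+: l
      · obtain ⟨t, rfl⟩ := h2
        have hlt : t.length ≤ m := by simp [pMs] at hl; omega
        rw [case_match [(pMr,rMr)] [(pMrs,rMrs),(pDr,rDr),(pProf,rProf),(pInc,rInc),(pLtd,rLtd),(pEtc,rEtc)] pMs rMs rfl (by decide) (by decide) (by decide) t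
          (fun _ hrof => by
            obtain ⟨s, hs⟩ := hrof
            have hinf : (pMs ++ rof) <:+: (pMs ++ t) :=
              List.IsPrefix.isInfix (⟨s, by rw [List.append_assoc, hs]⟩ : (pMs ++ rof) <+: (pMs ++ t))
            exact hB (Or.inr (Or.inl hinf)))]
        rw [scan_ms, ih t hlt (nobad_suffix hB)]
      · by_cases h3 : pMrs <+: l
        · obtain ⟨t, rfl⟩ := h3
          have hlt : t.length ≤ m := by simp [pMrs] at hl; omega
          rw [case_match [(pMr,rMr),(pMs,rMs)] [(pDr,rDr),(pProf,rProf),(pInc,rInc),(pLtd,rLtd),(pEtc,rEtc)] pMrs rMrs rfl (by decide) (by decide) (by decide) t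
            (fun _ hrof => by
              obtain ⟨s, hs⟩ := hrof
              have hinf : (pMrs ++ rof) <:+: (pMrs ++ t) :=
                List.IsPrefix.isInfix (⟨s, by rw [List.append_assoc, hs]⟩ : (pMrs ++ rof) <+: (pMrs ++ t))
              exact hB (Or.inr (Or.inr (Or.inl hinf))))]
          rw [scan_mrs, ih t hlt (nobad_suffix hB)]
        · by_cases h4 : pDr <+: l
          · obtain ⟨t, rfl⟩ := h4
            have hlt : t.length ≤ m := by simp [pDr] at hl; omega
            rw [case_match [(pMr,rMr),(pMs,rMs),(pMrs,rMrs)] [(pProf,rProf),(pInc,rInc),(pLtd,rLtd),(pEtc,rEtc)] pDr rDr rfl (by decide) (by decide) (by decide) t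
              (fun _ hrof => by
                obtain ⟨s, hs⟩ := hrof
                have hinf : (pDr ++ rof) <:+: (pDr ++ t) :=
                  List.IsPrefix.isInfix (⟨s, by rw [List.append_assoc, hs]⟩ : (pDr ++ rof) <+: (pDr ++ t))
                exact hB (Or.inr (Or.inr (Or.inr hinf))))]
            rw [scan_dr, ih t hlt (nobad_suffix hB)]
          · by_cases h5 : pProf <+: l
            · obtain ⟨t, rfl⟩ := h5
              have hlt : t.length ≤ m := by simp [pProf] at hl; omega
              rw [case_match [(pMr,rMr),(pMs,rMs),(pMrs,rMrs),(pDr,rDr)] [(pInc,rInc),(pLtd,rLtd),(pEtc,rEtc)] pProf rProf rfl (by decide) (by decide) (by decide) t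
                (fun hex _ => absurd hex (by decide))]
              rw [scan_prof, ih t hlt (nobad_suffix hB)]
            · by_cases h6 : pInc <+: l
              · obtain ⟨t, rfl⟩ := h6
                have hlt : t.length ≤ m := by simp [pInc] at hl; omega
                rw [case_match [(pMr,rMr),(pMs,rMs),(pMrs,rMrs),(pDr,rDr),(pProf,rProf)] [(pLtd,rLtd),(pEtc,rEtc)] pInc rInc rfl (by decide) (by decide) (by decide) t
                  (fun hex _ => absurd hex (by decide))]
                rw [scan_inc, ih t hlt (nobad_suffix hB)]
              · by_cases h7 : pLtd <+: l
                · obtain ⟨t, rfl⟩ := h7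
                  have hlt : t.length ≤ m := by simp [pLtd] at hl; omega
                  rw [case_match [(pMr,rMr),(pMs,rMs),(pMrs,rMrs),(pDr,rDr),(pProf,rProf),(pInc,rInc)] [(pEtc,rEtc)] pLtd rLtd rfl (by decide) (by decide) (by decide) t
                    (fun hex _ => absurd hex (by decide))]
                  rw [scan_ltd, ih t hlt (nobad_suffix hB)]
                · by_cases h8 : pEtc <+: l
                  · obtain ⟨t, rfl⟩ := h8
                    have hlt : t.length ≤ m := by simp [pEtc] at hl; omega
                    rw [case_match [(pMr,rMr),(pMs,rMs),(pMrs,rMrs),(pDr,rDr),(pProf,rProf),(pInc,rInc),(pLtd,rLtd)] [] pEtc rEtc rfl (by decide) (by decide) (by decide) t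
                      (fun hex _ => absurd hex (by decide))]
                    rw [scan_etc, ih t hlt (nobad_suffix hB)]
                  · cases l with
                    | nil => rw [passes_nil, scan]
                    | cons c t =>
                      have hnp : ∀ pr ∈ PATS, ¬ pr.1 <+: (c :: t) := by
                        intro pr hpr
                        have hcases : pr = (pMr,rMr) ∨ pr = (pMs,rMs) ∨ pr = (pMrs,rMrs) ∨ pr = (pDr,rDr) ∨
                            pr = (pProf,rProf) ∨ pr = (pInc,rInc) ∨ pr = (pLtd,rLtd) ∨ pr = (pEtc,rEtc) := by
                          simpa [PATS] using hpr
                        rcases hcases with rfl | rfl | rfl | rfl | rfl | rfl | rfl | rfl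
                        exacts [h1, h2, h3, h4, h5, h6, h7, h8]
                      have hlt : t.length ≤ m := by simp at hl; omega
                      rw [passes_cons PATS (fun y hy => hy) c t hnp, scan_cons_neg c t hnp,
                        ih t hlt (nobad_suffix (a := [c]) hB)]

lemma A_eq (text : String) :
    handle_abbreviations_py text = String.ofList (passes PATS text.toList) := by
  rw [← String.toList_inj]
  simp only [handle_abbreviations_py, PySem.Str.toList_replace, String.toList_ofList]
  rw [replace_eq_rep "etc.".toList "ETC_TEMP".toList (by decide),
    replace_eq_rep "Ltd.".toList "LTD_TEMP".toList (by decide),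
    replace_eq_rep "Inc.".toList "INC_TEMP".toList (by decide),
    replace_eq_rep "Prof.".toList "PROF_TEMP".toList (by decide),
    replace_eq_rep "Dr.".toList "DR_TEMP".toList (by decide),
    replace_eq_rep "Mrs.".toList "MRS_TEMP".toList (by decide),
    replace_eq_rep "Ms.".toList "MS_TEMP".toList (by decide),
    replace_eq_rep "Mr.".toList "MR_TEMP".toList (by decide)]
  simp only [passes, PATS,
    show "Mr.".toList = pMr from by decide, show "MR_TEMP".toList = rMr from by decide,
    show "Ms.".toList = pMs from by decide, show "MS_TEMP".toList = rMs from by decide,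
    show "Mrs.".toList = pMrs from by decide, show "MRS_TEMP".toList = rMrs from by decide,
    show "Dr.".toList = pDr from by decide, show "DR_TEMP".toList = rDr from by decide,
    show "Prof.".toList = pProf from by decide, show "PROF_TEMP".toList = rProf from by decide,
    show "Inc.".toList = pInc from by decide, show "INC_TEMP".toList = rInc from by decide,
    show "Ltd.".toList = pLtd from by decide, show "LTD_TEMP".toList = rLtd from by decide,
    show "etc.".toList = pEtc from by decide, show "ETC_TEMP".toList = rEtc from by decide]

-- ---- tightness: A and B differ on EVERY text in the change region ----

def LAST3 : List (List Char × List Char) := [(pInc,rInc),(pLtd,rLtd),(pEtc,rEtc)]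
def BADS : List (List Char) := [pMr ++ rof, pMs ++ rof, pMrs ++ rof, pDr ++ rof]

lemma bads_vs_pats : ∀ b ∈ BADS, ∀ pr ∈ PATS, mism b pr.1 = true ∨ b = pr.1 ++ rof := by decide
lemma bads_drop_mism : ∀ b ∈ BADS, ∀ pr ∈ PATS, ∀ k < pr.1.length, 0 < k → mism b (pr.1.drop k) = true := by decide
lemma bads_head : ∀ b ∈ BADS, ∃ pr ∈ PATS, pr.1 <+: b := by decide

lemma bad_drop (b a t : List Char) (h : b <:+: a ++ t)
    (hk : ∀ k < a.length, ¬ b <+: (a.drop k ++ t)) : b <:+: t := by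
  induction a with
  | nil => simpa using h
  | cons c a' ih =>
    rw [List.cons_append, List.infix_cons_iff] at h
    rcases h with h | h
    · exact absurd h (by simpa using hk 0 (by simp))
    · exact ih h (fun k hk' => by simpa using hk (k + 1) (by simpa using hk'))

lemma ne_append_of_getElem (X Y Z W : List Char) (m : Nat) (hmx : m < X.length)
    (hmy : m < Y.length) (hne : X[m]? ≠ Y[m]?) : X ++ Z ≠ Y ++ W := by
  intro h
  apply hne
  rw [← List.getElem?_append_left (l₂ := Z) hmx, ← List.getElem?_append_left (l₂ := W) hmy, h]

lemma cascadeA (pre mid : List (List Char × List Char)) (p r : List Char) (u : List Char)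
    (hsplit : PATS = (pre ++ (p, r) :: mid) ++ (pProf, rProf) :: LAST3)
    (hm1 : ∀ pr ∈ pre, ∀ k < (p ++ rof).length, mism pr.1 ((p ++ rof).drop k) = true)
    (hm2 : ∀ k < rof.length, mism p (rof.drop k) = true)
    (hp : p ≠ [])
    (hm3 : ∀ pr ∈ mid, ∀ k < (r ++ rof).length, mism pr.1 ((r ++ rof).drop k) = true)
    (heq : r ++ rof = r.dropLast ++ pProf)
    (hm4 : ∀ k < r.dropLast.length, mism pProf (r.dropLast.drop k) = true)
    (hm5 : ∀ pr ∈ LAST3, ∀ k < (r.dropLast ++ rProf).length, mism pr.1 ((r.dropLast ++ rProf).drop k) = true) :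
    ∃ Z, passes PATS ((p ++ rof) ++ u) = (r.dropLast ++ rProf) ++ Z := by
  obtain ⟨c, p', rfl⟩ : ∃ c p', p = c :: p' := by
    cases p with
    | nil => exact absurd rfl hp
    | cons a b => exact ⟨a, b, rfl⟩
  have e2 : ∀ X, rep (c :: p') r (((c :: p') ++ rof) ++ X) = (r ++ rof) ++ rep (c :: p') r X := by
    intro X
    rw [List.append_assoc, rep_match,
      rep_skip _ _ rof _ (fun k hk => not_prefix_of_mism (hm2 k hk) _), List.append_assoc]
  have e4 : ∀ Y, rep pProf rProf ((r ++ rof) ++ Y) = (r.dropLast ++ rProf) ++ rep pProf rProf Y := by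
    intro Y
    rw [heq, List.append_assoc,
      rep_skip _ _ r.dropLast _ (fun k hk => not_prefix_of_mism (hm4 k hk) _)]
    rw [show pProf = 'P' :: ('r' :: 'o' :: 'f' :: '.' :: []) from rfl, rep_match, List.append_assoc]
  refine ⟨passes LAST3 (rep pProf rProf (passes mid (rep (c :: p') r (passes pre u)))), ?_⟩
  calc passes PATS (((c :: p') ++ rof) ++ u)
      = passes ((pProf, rProf) :: LAST3)
          (passes mid (rep (c :: p') r (passes pre (((c :: p') ++ rof) ++ u)))) := by
        rw [hsplit, passes_append, passes_append]; rfl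
    _ = passes ((pProf, rProf) :: LAST3)
          (passes mid (rep (c :: p') r (((c :: p') ++ rof) ++ passes pre u))) := by
        rw [passes_skip pre _ _ hm1]
    _ = passes ((pProf, rProf) :: LAST3)
          (passes mid ((r ++ rof) ++ rep (c :: p') r (passes pre u))) := by rw [e2]
    _ = passes ((pProf, rProf) :: LAST3)
          ((r ++ rof) ++ passes mid (rep (c :: p') r (passes pre u))) := by
        rw [passes_skip mid _ _ hm3]
    _ = passes LAST3 (rep pProf rProf ((r ++ rof) ++ passes mid (rep (c :: p') r (passes pre u)))) := rfl
    _ = passes LAST3 ((r.dropLast ++ rProf) ++ rep pProf rProf (passes mid (rep (c :: p') r (passes pre u)))) := by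
        rw [e4]
    _ = (r.dropLast ++ rProf) ++ passes LAST3 (rep pProf rProf (passes mid (rep (c :: p') r (passes pre u)))) := by
        rw [passes_skip LAST3 _ _ hm5]

lemma scan_inert_cons (c : Char) (t : List Char)
    (hc : PATS.all (fun pr => !(pr.1.head? == some c)) = true) : scan (c :: t) = c :: scan t := by
  apply scan_cons_neg
  intro pr hpr hpre
  simp only [List.all_eq_true, Bool.not_eq_true', beq_eq_false_iff_ne] at hc
  obtain ⟨c0, v, hv⟩ : ∃ c0 v, pr.1 = c0 :: v := by
    cases hv : pr.1 with
    | nil => exact absurd hv (pats_p_ne_nil pr hpr)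
    | cons a b => exact ⟨a, b, rfl⟩
  rw [hv, List.cons_prefix_cons] at hpre
  exact hc pr hpr (by rw [hv, hpre.1]; rfl)

lemma cascadeB (p r : List Char) (u : List Char) (hscan : ∀ t, scan (p ++ t) = r ++ scan t) :
    scan ((p ++ rof) ++ u) = (r ++ rof) ++ scan u := by
  rw [List.append_assoc, hscan]
  rw [show rof ++ u = 'r' :: 'o' :: 'f' :: '.' :: u from rfl]
  rw [scan_inert_cons _ _ (by decide), scan_inert_cons _ _ (by decide),
    scan_inert_cons _ _ (by decide), scan_inert_cons _ _ (by decide)]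
  simp [rof]

lemma tight (n : Nat) : ∀ l : List Char, l.length ≤ n → (∃ b ∈ BADS, b <:+: l) →
    passes PATS l ≠ scan l := by
  induction n with
  | zero =>
    intro l hl hb
    exfalso
    obtain ⟨b, hbm, hbi⟩ := hb
    have hnil : l = [] := by cases l <;> simp_all
    subst hnil
    have hbnil : b = [] := by simpa using hbi
    revert hbm
    rw [hbnil]
    decide
  | succ m ih =>
    intro l hl hb
    obtain ⟨b, hbm, hbi⟩ := hb
    by_cases h1 : pMr <+: l
    · obtain ⟨t, rfl⟩ := h1
      by_cases hrof : rof <+: t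
      · obtain ⟨u, rfl⟩ := hrof
        obtain ⟨Z, hZ⟩ := cascadeA [] [(pMs,rMs),(pMrs,rMrs),(pDr,rDr)] pMr rMr u rfl
          (by decide) (by decide) (by decide) (by decide) (by decide) (by decide) (by decide)
        rw [← List.append_assoc, hZ, cascadeB pMr rMr u scan_mr]
        exact ne_append_of_getElem _ _ _ _ 7 (by decide) (by decide) (by decide)
      · have hbt : b <:+: t := by
          apply bad_drop b pMr t hbi
          intro k hk
          rcases Nat.eq_zero_or_pos k with rfl | hpos
          · simp only [List.drop_zero]
            intro hp
            rcases bads_vs_pats b hbm (pMr,rMr) (by decide) with hmism | heqb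
            · exact not_prefix_of_mism hmism t hp
            · rw [show (pMr,rMr).1 ++ rof = pMr ++ rof from rfl] at heqb
              rw [heqb] at hp
              obtain ⟨s, hs⟩ := hp
              rw [List.append_assoc] at hs
              exact hrof ⟨s, List.append_cancel_left hs⟩
          · exact not_prefix_of_mism (bads_drop_mism b hbm (pMr,rMr) (by decide) k (by simpa [pMr] using hk) hpos) t
        have hlt : t.length ≤ m := by simp [pMr] at hl; omega
        rw [case_match [] [(pMs,rMs),(pMrs,rMrs),(pDr,rDr),(pProf,rProf),(pInc,rInc),(pLtd,rLtd),(pEtc,rEtc)] pMr rMr rfl (by decide) (by decide) (by decide) t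
          (fun _ hr => absurd hr hrof), scan_mr]
        intro he
        exact ih t hlt ⟨b, hbm, hbt⟩ (List.append_cancel_left he)
    · by_cases h2 : pMs <+: l
      · obtain ⟨t, rfl⟩ := h2
        by_cases hrof : rof <+: t
        · obtain ⟨u, rfl⟩ := hrof
          obtain ⟨Z, hZ⟩ := cascadeA [(pMr,rMr)] [(pMrs,rMrs),(pDr,rDr)] pMs rMs u rfl
            (by decide) (by decide) (by decide) (by decide) (by decide) (by decide) (by decide)
          rw [← List.append_assoc, hZ, cascadeB pMs rMs u scan_ms]
          exact ne_append_of_getElem _ _ _ _ 7 (by decide) (by decide) (by decide)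
        · have hbt : b <:+: t := by
            apply bad_drop b pMs t hbi
            intro k hk
            rcases Nat.eq_zero_or_pos k with rfl | hpos
            · simp only [List.drop_zero]
              intro hp
              rcases bads_vs_pats b hbm (pMs,rMs) (by decide) with hmism | heqb
              · exact not_prefix_of_mism hmism t hp
              · rw [show (pMs,rMs).1 ++ rof = pMs ++ rof from rfl] at heqb
                rw [heqb] at hp
                obtain ⟨s, hs⟩ := hp
                rw [List.append_assoc] at hs
                exact hrof ⟨s, List.append_cancel_left hs⟩
            · exact not_prefix_of_mism (bads_drop_mism b hbm (pMs,rMs) (by decide) k (by simpa [pMs] using hk) hpos) t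
          have hlt : t.length ≤ m := by simp [pMs] at hl; omega
          rw [case_match [(pMr,rMr)] [(pMrs,rMrs),(pDr,rDr),(pProf,rProf),(pInc,rInc),(pLtd,rLtd),(pEtc,rEtc)] pMs rMs rfl (by decide) (by decide) (by decide) t
            (fun _ hr => absurd hr hrof), scan_ms]
          intro he
          exact ih t hlt ⟨b, hbm, hbt⟩ (List.append_cancel_left he)
      · by_cases h3 : pMrs <+: l
        · obtain ⟨t, rfl⟩ := h3
          by_cases hrof : rof <+: t
          · obtain ⟨u, rfl⟩ := hrof
            obtain ⟨Z, hZ⟩ := cascadeA [(pMr,rMr),(pMs,rMs)] [(pDr,rDr)] pMrs rMrs u rfl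
              (by decide) (by decide) (by decide) (by decide) (by decide) (by decide) (by decide)
            rw [← List.append_assoc, hZ, cascadeB pMrs rMrs u scan_mrs]
            exact ne_append_of_getElem _ _ _ _ 8 (by decide) (by decide) (by decide)
          · have hbt : b <:+: t := by
              apply bad_drop b pMrs t hbi
              intro k hk
              rcases Nat.eq_zero_or_pos k with rfl | hpos
              · simp only [List.drop_zero]
                intro hp
                rcases bads_vs_pats b hbm (pMrs,rMrs) (by decide) with hmism | heqb
                · exact not_prefix_of_mism hmism t hp
                · rw [show (pMrs,rMrs).1 ++ rof = pMrs ++ rof from rfl] at heqb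
                  rw [heqb] at hp
                  obtain ⟨s, hs⟩ := hp
                  rw [List.append_assoc] at hs
                  exact hrof ⟨s, List.append_cancel_left hs⟩
              · exact not_prefix_of_mism (bads_drop_mism b hbm (pMrs,rMrs) (by decide) k (by simpa [pMrs] using hk) hpos) t
            have hlt : t.length ≤ m := by simp [pMrs] at hl; omega
            rw [case_match [(pMr,rMr),(pMs,rMs)] [(pDr,rDr),(pProf,rProf),(pInc,rInc),(pLtd,rLtd),(pEtc,rEtc)] pMrs rMrs rfl (by decide) (by decide) (by decide) t
              (fun _ hr => absurd hr hrof), scan_mrs]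
            intro he
            exact ih t hlt ⟨b, hbm, hbt⟩ (List.append_cancel_left he)
        · by_cases h4 : pDr <+: l
          · obtain ⟨t, rfl⟩ := h4
            by_cases hrof : rof <+: t
            · obtain ⟨u, rfl⟩ := hrof
              obtain ⟨Z, hZ⟩ := cascadeA [(pMr,rMr),(pMs,rMs),(pMrs,rMrs)] [] pDr rDr u rfl
                (by decide) (by decide) (by decide) (by decide) (by decide) (by decide) (by decide)
              rw [← List.append_assoc, hZ, cascadeB pDr rDr u scan_dr]
              exact ne_append_of_getElem _ _ _ _ 7 (by decide) (by decide) (by decide)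
            · have hbt : b <:+: t := by
                apply bad_drop b pDr t hbi
                intro k hk
                rcases Nat.eq_zero_or_pos k with rfl | hpos
                · simp only [List.drop_zero]
                  intro hp
                  rcases bads_vs_pats b hbm (pDr,rDr) (by decide) with hmism | heqb
                  · exact not_prefix_of_mism hmism t hp
                  · rw [show (pDr,rDr).1 ++ rof = pDr ++ rof from rfl] at heqb
                    rw [heqb] at hp
                    obtain ⟨s, hs⟩ := hp
                    rw [List.append_assoc] at hs
                    exact hrof ⟨s, List.append_cancel_left hs⟩
                · exact not_prefix_of_mism (bads_drop_mism b hbm (pDr,rDr) (by decide) k (by simpa [pDr] using hk) hpos) t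
              have hlt : t.length ≤ m := by simp [pDr] at hl; omega
              rw [case_match [(pMr,rMr),(pMs,rMs),(pMrs,rMrs)] [(pProf,rProf),(pInc,rInc),(pLtd,rLtd),(pEtc,rEtc)] pDr rDr rfl (by decide) (by decide) (by decide) t
                (fun _ hr => absurd hr hrof), scan_dr]
              intro he
              exact ih t hlt ⟨b, hbm, hbt⟩ (List.append_cancel_left he)
          · by_cases h5 : pProf <+: l
            · obtain ⟨t, rfl⟩ := h5
              have hbt : b <:+: t := by
                apply bad_drop b pProf t hbi
                intro k hk
                rcases Nat.eq_zero_or_pos k with rfl | hpos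
                · simp only [List.drop_zero]
                  intro hp
                  rcases bads_vs_pats b hbm (pProf,rProf) (by decide) with hmism | heqb
                  · exact not_prefix_of_mism hmism t hp
                  · exfalso
                    revert hbm
                    rw [heqb]
                    decide
                · exact not_prefix_of_mism (bads_drop_mism b hbm (pProf,rProf) (by decide) k (by simpa [pProf] using hk) hpos) t
              have hlt : t.length ≤ m := by simp [pProf] at hl; omega
              rw [case_match [(pMr,rMr),(pMs,rMs),(pMrs,rMrs),(pDr,rDr)] [(pInc,rInc),(pLtd,rLtd),(pEtc,rEtc)] pProf rProf rfl (by decide) (by decide) (by decide) t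
                (fun hex _ => absurd hex (by decide)), scan_prof]
              intro he
              exact ih t hlt ⟨b, hbm, hbt⟩ (List.append_cancel_left he)
            · by_cases h6 : pInc <+: l
              · obtain ⟨t, rfl⟩ := h6
                have hbt : b <:+: t := by
                  apply bad_drop b pInc t hbi
                  intro k hk
                  rcases Nat.eq_zero_or_pos k with rfl | hpos
                  · simp only [List.drop_zero]
                    intro hp
                    rcases bads_vs_pats b hbm (pInc,rInc) (by decide) with hmism | heqb
                    · exact not_prefix_of_mism hmism t hp
                    · exfalso
                      revert hbm
                      rw [heqb]
                      decide
                  · exact not_prefix_of_mism (bads_drop_mism b hbm (pInc,rInc) (by decide) k (by simpa [pInc] using hk) hpos) t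
                have hlt : t.length ≤ m := by simp [pInc] at hl; omega
                rw [case_match [(pMr,rMr),(pMs,rMs),(pMrs,rMrs),(pDr,rDr),(pProf,rProf)] [(pLtd,rLtd),(pEtc,rEtc)] pInc rInc rfl (by decide) (by decide) (by decide) t
                  (fun hex _ => absurd hex (by decide)), scan_inc]
                intro he
                exact ih t hlt ⟨b, hbm, hbt⟩ (List.append_cancel_left he)
              · by_cases h7 : pLtd <+: l
                · obtain ⟨t, rfl⟩ := h7
                  have hbt : b <:+: t := by
                    apply bad_drop b pLtd t hbi
                    intro k hk
                    rcases Nat.eq_zero_or_pos k with rfl | hpos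
                    · simp only [List.drop_zero]
                      intro hp
                      rcases bads_vs_pats b hbm (pLtd,rLtd) (by decide) with hmism | heqb
                      · exact not_prefix_of_mism hmism t hp
                      · exfalso
                        revert hbm
                        rw [heqb]
                        decide
                    · exact not_prefix_of_mism (bads_drop_mism b hbm (pLtd,rLtd) (by decide) k (by simpa [pLtd] using hk) hpos) t
                  have hlt : t.length ≤ m := by simp [pLtd] at hl; omega
                  rw [case_match [(pMr,rMr),(pMs,rMs),(pMrs,rMrs),(pDr,rDr),(pProf,rProf),(pInc,rInc)] [(pEtc,rEtc)] pLtd rLtd rfl (by decide) (by decide) (by decide) t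
                    (fun hex _ => absurd hex (by decide)), scan_ltd]
                  intro he
                  exact ih t hlt ⟨b, hbm, hbt⟩ (List.append_cancel_left he)
                · by_cases h8 : pEtc <+: l
                  · obtain ⟨t, rfl⟩ := h8
                    have hbt : b <:+: t := by
                      apply bad_drop b pEtc t hbi
                      intro k hk
                      rcases Nat.eq_zero_or_pos k with rfl | hpos
                      · simp only [List.drop_zero]
                        intro hp
                        rcases bads_vs_pats b hbm (pEtc,rEtc) (by decide) with hmism | heqb
                        · exact not_prefix_of_mism hmism t hp
                        · exfalso
                          revert hbm
                          rw [heqb]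
                          decide
                      · exact not_prefix_of_mism (bads_drop_mism b hbm (pEtc,rEtc) (by decide) k (by simpa [pEtc] using hk) hpos) t
                    have hlt : t.length ≤ m := by simp [pEtc] at hl; omega
                    rw [case_match [(pMr,rMr),(pMs,rMs),(pMrs,rMrs),(pDr,rDr),(pProf,rProf),(pInc,rInc),(pLtd,rLtd)] [] pEtc rEtc rfl (by decide) (by decide) (by decide) t
                      (fun hex _ => absurd hex (by decide)), scan_etc]
                    intro he
                    exact ih t hlt ⟨b, hbm, hbt⟩ (List.append_cancel_left he)
                  · cases l with
                    | nil =>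
                      exfalso
                      have hbnil : b = [] := by simpa using hbi
                      revert hbm
                      rw [hbnil]
                      decide
                    | cons c t =>
                      have hnp : ∀ pr ∈ PATS, ¬ pr.1 <+: (c :: t) := by
                        intro pr hpr
                        have hcases : pr = (pMr,rMr) ∨ pr = (pMs,rMs) ∨ pr = (pMrs,rMrs) ∨ pr = (pDr,rDr) ∨
                            pr = (pProf,rProf) ∨ pr = (pInc,rInc) ∨ pr = (pLtd,rLtd) ∨ pr = (pEtc,rEtc) := by
                          simpa [PATS] using hpr
                        rcases hcases with rfl | rfl | rfl | rfl | rfl | rfl | rfl | rfl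
                        exacts [h1, h2, h3, h4, h5, h6, h7, h8]
                      have hbt : b <:+: t := by
                        rw [List.infix_cons_iff] at hbi
                        rcases hbi with hbi | hbi
                        · exfalso
                          obtain ⟨pr, hprm, hprb⟩ := bads_head b hbm
                          exact hnp pr hprm (hprb.trans hbi)
                        · exact hbi
                      have hlt : t.length ≤ m := by simp at hl; omega
                      rw [passes_cons PATS (fun y hy => hy) c t hnp, scan_cons_neg c t hnp]
                      intro he
                      exact ih t hlt ⟨b, hbm, hbt⟩ (by simpa using he)

-- ===== VERDICT (by name: the statement is the Claim_ definition above) =====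
theorem handle_abbreviations_py_spec : Claim_unchanged_handle_abbreviations_py := by
  intro text _hdom
  unfold Spec_handle_abbreviations_py
  intro hD
  rw [A_eq, handle_abbreviations_py_alt, String.ofList_inj]
  apply main text.toList.length text.toList le_rfl
  intro hb
  apply hD
  unfold D_handle_abbreviations_py
  rcases hb with h | h | h | h
  · exact Or.inl ((PySem.Str.isIn_iff_infix _ _).mpr
      (by rw [show ("Mr.rof." : String).toList = pMr ++ rof from by decide]; exact h))
  · exact Or.inr (Or.inl ((PySem.Str.isIn_iff_infix _ _).mpr
      (by rw [show ("Ms.rof." : String).toList = pMs ++ rof from by decide]; exact h)))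
  · exact Or.inr (Or.inr (Or.inl ((PySem.Str.isIn_iff_infix _ _).mpr
      (by rw [show ("Mrs.rof." : String).toList = pMrs ++ rof from by decide]; exact h))))
  · exact Or.inr (Or.inr (Or.inr ((PySem.Str.isIn_iff_infix _ _).mpr
      (by rw [show ("Dr.rof." : String).toList = pDr ++ rof from by decide]; exact h))))

theorem handle_abbreviations_py_changed : Claim_changed_handle_abbreviations_py := by
  unfold Claim_changed_handle_abbreviations_py
  refine ⟨by decide, Or.inl ((PySem.Str.isIn_iff_infix _ _).mpr (by decide)), ?_, ?_, ?_⟩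
  · rw [← String.toList_inj]
    simp only [handle_abbreviations_py, PySem.Str.toList_replace]
    decide
  · rw [← String.toList_inj]
    simp only [handle_abbreviations_py_alt, String.toList_ofList]
    rw [show (pvDiffWitness_handle_abbreviations_py).toList = pMr ++ ['r','o','f','.'] from by decide,
      scan_mr]
    rw [show (['r','o','f','.'] : List Char) = 'r' :: 'o' :: 'f' :: '.' :: [] from rfl]
    rw [scan_cons_neg _ _ (by decide), scan_cons_neg _ _ (by decide),
      scan_cons_neg _ _ (by decide), scan_cons_neg _ _ (by decide), scan]
    decide
  · intro h
    exact absurd (String.toList_inj.mpr h) (by decide)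


theorem handle_abbreviations_py_tight : Claim_exact_handle_abbreviations_py := by
  intro text _hdom hd
  rw [A_eq, handle_abbreviations_py_alt]
  intro he
  have hlist : passes PATS text.toList = scan text.toList := String.ofList_inj.mp he
  apply tight text.toList.length text.toList le_rfl ?_ hlist
  rcases hd with h | h | h | h
  · exact ⟨pMr ++ rof, by decide,
      by rw [show pMr ++ rof = ("Mr.rof." : String).toList from by decide]
         exact (PySem.Str.isIn_iff_infix _ _).mp h⟩
  · exact ⟨pMs ++ rof, by decide,
      by rw [show pMs ++ rof = ("Ms.rof." : String).toList from by decide]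
         exact (PySem.Str.isIn_iff_infix _ _).mp h⟩
  · exact ⟨pMrs ++ rof, by decide,
      by rw [show pMrs ++ rof = ("Mrs.rof." : String).toList from by decide]
         exact (PySem.Str.isIn_iff_infix _ _).mp h⟩
  · exact ⟨pDr ++ rof, by decide,
      by rw [show pDr ++ rof = ("Dr.rof." : String).toList from by decide]
         exact (PySem.Str.isIn_iff_infix _ _).mp h⟩
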